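-- pv_equiv track=rewrite | github.com/abhisheks28/skillbuilder | server_python/app/features/question_book/Grade1/generators.py | create_tally_svg
-- ===== SOURCE A (Python) =====
-- import math
--
-- def create_tally_svg(count):
--     height = 50
--     spacing = 20
--     num_groups = math.ceil(count / 5)
--     total_width = num_groups * (40 + spacing)
--     svg_lines = ""
--     for g in range(num_groups):
--         group_x = g * (40 + spacing)
--         marks_in_group = min(5, count - g * 5)
--         for i in range(min(marks_in_group, 4)):
--             x = group_x + i * 10
--             svg_lines += f'<line x1="{x}" y1="5" x2="{x}" y2="45" stroke="white" stroke-width="4" stroke-linecap="round" />'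
--         if marks_in_group == 5:
--             svg_lines += f'<line x1="{group_x - 5}" y1="5" x2="{group_x + 35}" y2="45" stroke="white" stroke-width="4" stroke-linecap="round" />'
--     return f'<svg width="{total_width}" height="{height}" viewBox="0 0 {total_width} {height}" xmlns="http://www.w3.org/2000/svg" style="display:inline-block; vertical-align:middle; overflow:visible;">{svg_lines}</svg>'
-- ===== SOURCE B (Python) =====
-- import math
--
-- def create_tally_svg(count):
--     num_groups = math.ceil(count / 5)
--     total_width = num_groups * 60
--     parts = []
--     for i in range(count):
--         g, idx = divmod(i, 5)
--         if idx < 4: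
--             x = g * 60 + idx * 10
--             parts.append(f'<line x1="{x}" y1="5" x2="{x}" y2="45" stroke="white" stroke-width="4" stroke-linecap="round" />')
--         else:
--             gx = g * 60
--             parts.append(f'<line x1="{gx - 5}" y1="5" x2="{gx + 35}" y2="45" stroke="white" stroke-width="4" stroke-linecap="round" />')
--     return f'<svg width="{total_width}" height="50" viewBox="0 0 {total_width} 50" xmlns="http://www.w3.org/2000/svg" style="display:inline-block; vertical-align:middle; overflow:visible;">{"".join(parts)}</svg>'
-- ===== Notes on version B (the rewrite author's own statement) =====
-- stated objective: simpler
-- what changed: Replaces A's nested group/in-group loops and repeated string concatenation by one flat loop over mark indices, where divmod(i,5) picks the group and the position, collecting the pieces in a list joined once.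
import Mathlib
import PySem

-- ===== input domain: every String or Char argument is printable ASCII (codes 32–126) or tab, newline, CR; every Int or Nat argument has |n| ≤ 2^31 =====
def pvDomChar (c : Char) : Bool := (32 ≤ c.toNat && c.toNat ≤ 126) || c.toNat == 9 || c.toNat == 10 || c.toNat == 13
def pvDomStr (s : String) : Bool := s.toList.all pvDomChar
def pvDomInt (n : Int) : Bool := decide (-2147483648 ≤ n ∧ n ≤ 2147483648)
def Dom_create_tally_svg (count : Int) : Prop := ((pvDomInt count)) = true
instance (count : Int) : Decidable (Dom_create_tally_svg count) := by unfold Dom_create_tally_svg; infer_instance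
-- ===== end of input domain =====

-- B replaces A's nested group/mark loops by one flat loop over mark indices (divmod picks the
-- group and position) collected into a list joined once; objective: simpler/alternative decomposition.

-- ===== PORT A =====
-- f-string for one vertical tally mark
def pvVertA (x : Int) : String :=
  "<line x1=\"" ++ PySem.Int.toStr x ++ "\" y1=\"5\" x2=\"" ++ PySem.Int.toStr x ++
  "\" y2=\"45\" stroke=\"white\" stroke-width=\"4\" stroke-linecap=\"round\" />"

-- f-string for the diagonal fifth mark of a group
def pvDiagA (group_x : Int) : String :=
  "<line x1=\"" ++ PySem.Int.toStr (group_x - 5) ++ "\" y1=\"5\" x2=\"" ++ PySem.Int.toStr (group_x + 35) ++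
  "\" y2=\"45\" stroke=\"white\" stroke-width=\"4\" stroke-linecap=\"round\" />"

def create_tally_svg (count : Int) : String :=
  let height : Int := 50
  let spacing : Int := 20
  -- math.ceil(count / 5): exact as integer ceiling division (count+4)//5 on Dom (|count| ≤ 2^31 < 2^53,
  -- so the float division's ceiling equals the integer ceiling)
  let num_groups : Int := PySem.Int.floordiv (count + 4) 5
  let total_width := num_groups * (40 + spacing)
  let svg_lines := (PySem.List.pyRange 0 num_groups 1).foldl (fun svg_lines g =>
    let group_x := g * (40 + spacing)
    let marks_in_group := min 5 (count - g * 5)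
    let svg_lines := (PySem.List.pyRange 0 (min marks_in_group 4) 1).foldl
      (fun svg_lines i => svg_lines ++ pvVertA (group_x + i * 10)) svg_lines
    if marks_in_group == 5 then svg_lines ++ pvDiagA group_x else svg_lines) ""
  "<svg width=\"" ++ PySem.Int.toStr total_width ++ "\" height=\"" ++ PySem.Int.toStr height ++
  "\" viewBox=\"0 0 " ++ PySem.Int.toStr total_width ++ " " ++ PySem.Int.toStr height ++
  "\" xmlns=\"http://www.w3.org/2000/svg\" style=\"display:inline-block; vertical-align:middle; overflow:visible;\">" ++
  svg_lines ++ "</svg>"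

-- ===== PORT B =====
def create_tally_svg_alt (count : Int) : String :=
  -- math.ceil(count / 5), exact on Dom as in port A
  let num_groups : Int := PySem.Int.floordiv (count + 4) 5
  let total_width := num_groups * 60
  let parts : List String := (PySem.List.pyRange 0 count 1).foldl (fun parts i =>
    let g := PySem.Int.floordiv i 5
    let idx := PySem.Int.mod i 5
    if idx < 4 then
      let x := g * 60 + idx * 10
      parts ++ ["<line x1=\"" ++ PySem.Int.toStr x ++ "\" y1=\"5\" x2=\"" ++ PySem.Int.toStr x ++
        "\" y2=\"45\" stroke=\"white\" stroke-width=\"4\" stroke-linecap=\"round\" />"]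
    else
      let gx := g * 60
      parts ++ ["<line x1=\"" ++ PySem.Int.toStr (gx - 5) ++ "\" y1=\"5\" x2=\"" ++ PySem.Int.toStr (gx + 35) ++
        "\" y2=\"45\" stroke=\"white\" stroke-width=\"4\" stroke-linecap=\"round\" />"]) []
  "<svg width=\"" ++ PySem.Int.toStr total_width ++ "\" height=\"50\" viewBox=\"0 0 " ++
  PySem.Int.toStr total_width ++ " 50\" xmlns=\"http://www.w3.org/2000/svg\" style=\"display:inline-block; vertical-align:middle; overflow:visible;\">" ++
  PySem.Str.join "" parts ++ "</svg>"

-- ===== PRECONDITION & SPEC =====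
def Spec_create_tally_svg (count : Int) (out : String) : Prop := out = create_tally_svg_alt count
instance (count : Int) (out : String) : Decidable (Spec_create_tally_svg count out) := by unfold Spec_create_tally_svg; infer_instance

-- ===== CLAIM (what is proved, stated in full; the proofs are below) =====
def Claim_equal_create_tally_svg : Prop := ∀ (count : Int), Dom_create_tally_svg count → Spec_create_tally_svg count (create_tally_svg count)

-- ===== LEMMAS AND PROOFS =====

-- the string B emits for mark index i (vertical for positions 0–3, diagonal for position 4)
def pvMark (i : Int) : String :=
  if PySem.Int.mod i 5 < 4 then pvVertA (PySem.Int.floordiv i 5 * 60 + PySem.Int.mod i 5 * 10)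
  else pvDiagA (PySem.Int.floordiv i 5 * 60)

theorem pv_chars_join_append (L : List (List Char)) (y : List Char) :
    PySem.Chars.join [] (L ++ [y]) = PySem.Chars.join [] L ++ y := by
  induction L with
  | nil => simp [PySem.Chars.join, List.intercalate]
  | cons a t ih =>
    cases t with
    | nil => simp [PySem.Chars.join, List.intercalate, List.intersperse]
    | cons b r =>
      simp [PySem.Chars.join, List.intercalate, List.intersperse] at ih ⊢
      simp [ih]

theorem pv_join_empty_append (l : List String) (x : String) :
    PySem.Str.join "" (l ++ [x]) = PySem.Str.join "" l ++ x := by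
  simp [PySem.Str.join, pv_chars_join_append]

theorem pv_join_foldl (l : List Int) (f : Int → String) (acc : List String) :
    PySem.Str.join "" (l.foldl (fun p i => p ++ [f i]) acc)
      = l.foldl (fun s i => s ++ f i) (PySem.Str.join "" acc) := by
  induction l generalizing acc with
  | nil => rfl
  | cons a t ih =>
    rw [List.foldl_cons, List.foldl_cons, ih, pv_join_empty_append]

theorem pv_mod5 (k j : Int) (h0 : 0 ≤ j) (h5 : j < 5) : PySem.Int.mod (5 * k + j) 5 = j := by
  rw [PySem.Int.mod_eq_emod_of_pos (by norm_num : (0:Int) < 5)]; omega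

theorem pv_div5 (k j : Int) (h0 : 0 ≤ j) (h5 : j < 5) : PySem.Int.floordiv (5 * k + j) 5 = k := by
  rw [PySem.Int.floordiv_eq_ediv_of_pos (by norm_num : (0:Int) < 5)]; omega

theorem pvMark_vert (i k j : Int) (hi : i = 5 * k + j) (h0 : 0 ≤ j) (h4 : j < 4) :
    pvMark i = pvVertA (k * 60 + j * 10) := by
  subst hi
  rw [pvMark, pv_mod5 k j h0 (by omega), pv_div5 k j h0 (by omega), if_pos h4]

theorem pvMark_diag (i k : Int) (hi : i = 5 * k + 4) : pvMark i = pvDiagA (k * 60) := by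
  subst hi
  rw [pvMark, pv_mod5 k 4 (by norm_num) (by norm_num), pv_div5 k 4 (by norm_num) (by norm_num)]
  simp

-- one group of A equals the flat-loop marks 5k … 5k+marks-1
theorem pv_group_eq (count k : Int) (h : 5 * k < count) (s : String) :
    (if min 5 (count - k * 5) == 5 then
       ((PySem.List.pyRange 0 (min (min 5 (count - k * 5)) 4) 1).foldl
         (fun sl i => sl ++ pvVertA (k * (40 + 20) + i * 10)) s) ++ pvDiagA (k * (40 + 20))
     else (PySem.List.pyRange 0 (min (min 5 (count - k * 5)) 4) 1).foldl
       (fun sl i => sl ++ pvVertA (k * (40 + 20) + i * 10)) s)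
    = (PySem.List.pyRange (5 * k) (min count (5 * k + 5)) 1).foldl (fun sl i => sl ++ pvMark i) s := by
  obtain ⟨m, hm, h1, h5⟩ : ∃ m, min (5:Int) (count - k * 5) = m ∧ 1 ≤ m ∧ m ≤ 5 :=
    ⟨_, rfl, by omega, by omega⟩
  have hcnt : min count (5 * k + 5) = 5 * k + m := by omega
  rw [hm, hcnt]
  interval_cases m
  · rw [show PySem.List.pyRange (0:Int) (min 1 4) 1 = [0] from by decide,
        show PySem.List.pyRange (5*k) (5*k+1) 1 = [5*k+0] from by
          rw [PySem.List.pyRange_one]; simp [show (5*k+1-5*k : Int) = 1 by ring, List.range_succ]]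
    simp only [List.foldl_cons, List.foldl_nil]
    rw [pvMark_vert (5*k+0) k 0 (by ring) (by norm_num) (by norm_num)]
    norm_num
  · rw [show PySem.List.pyRange (0:Int) (min 2 4) 1 = [0,1] from by decide,
        show PySem.List.pyRange (5*k) (5*k+2) 1 = [5*k+0, 5*k+1] from by
          rw [PySem.List.pyRange_one]; simp [show (5*k+2-5*k : Int) = 2 by ring, List.range_succ]]
    simp only [List.foldl_cons, List.foldl_nil]
    rw [pvMark_vert (5*k+0) k 0 (by ring) (by norm_num) (by norm_num),
        pvMark_vert (5*k+1) k 1 (by ring) (by norm_num) (by norm_num)]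
    norm_num
  · rw [show PySem.List.pyRange (0:Int) (min 3 4) 1 = [0,1,2] from by decide,
        show PySem.List.pyRange (5*k) (5*k+3) 1 = [5*k+0, 5*k+1, 5*k+2] from by
          rw [PySem.List.pyRange_one]; simp [show (5*k+3-5*k : Int) = 3 by ring, List.range_succ]]
    simp only [List.foldl_cons, List.foldl_nil]
    rw [pvMark_vert (5*k+0) k 0 (by ring) (by norm_num) (by norm_num),
        pvMark_vert (5*k+1) k 1 (by ring) (by norm_num) (by norm_num),
        pvMark_vert (5*k+2) k 2 (by ring) (by norm_num) (by norm_num)]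
    norm_num
  · rw [show PySem.List.pyRange (0:Int) (min 4 4) 1 = [0,1,2,3] from by decide,
        show PySem.List.pyRange (5*k) (5*k+4) 1 = [5*k+0, 5*k+1, 5*k+2, 5*k+3] from by
          rw [PySem.List.pyRange_one]; simp [show (5*k+4-5*k : Int) = 4 by ring, List.range_succ]]
    simp only [List.foldl_cons, List.foldl_nil]
    rw [pvMark_vert (5*k+0) k 0 (by ring) (by norm_num) (by norm_num),
        pvMark_vert (5*k+1) k 1 (by ring) (by norm_num) (by norm_num),
        pvMark_vert (5*k+2) k 2 (by ring) (by norm_num) (by norm_num),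
        pvMark_vert (5*k+3) k 3 (by ring) (by norm_num) (by norm_num)]
    norm_num
  · rw [show PySem.List.pyRange (0:Int) (min 5 4) 1 = [0,1,2,3] from by decide,
        show PySem.List.pyRange (5*k) (5*k+5) 1 = [5*k+0, 5*k+1, 5*k+2, 5*k+3, 5*k+4] from by
          rw [PySem.List.pyRange_one]; simp [show (5*k+5-5*k : Int) = 5 by ring, List.range_succ]]
    simp only [List.foldl_cons, List.foldl_nil]
    rw [pvMark_vert (5*k+0) k 0 (by ring) (by norm_num) (by norm_num),
        pvMark_vert (5*k+1) k 1 (by ring) (by norm_num) (by norm_num),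
        pvMark_vert (5*k+2) k 2 (by ring) (by norm_num) (by norm_num),
        pvMark_vert (5*k+3) k 3 (by ring) (by norm_num) (by norm_num),
        pvMark_diag (5*k+4) k (by ring)]
    norm_num

-- A's group loop over the first k groups equals the flat mark loop up to min count 5k
theorem pv_A_groups (count : Int) (k : Nat)
    (hk : (k : Int) ≤ PySem.Int.floordiv (count + 4) 5) (s : String) :
    (PySem.List.pyRange 0 (k : Int) 1).foldl (fun svg_lines g =>
      if min 5 (count - g * 5) == 5 then
        ((PySem.List.pyRange 0 (min (min 5 (count - g * 5)) 4) 1).foldl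
          (fun svg_lines i => svg_lines ++ pvVertA (g * (40 + 20) + i * 10)) svg_lines) ++
          pvDiagA (g * (40 + 20))
      else (PySem.List.pyRange 0 (min (min 5 (count - g * 5)) 4) 1).foldl
        (fun svg_lines i => svg_lines ++ pvVertA (g * (40 + 20) + i * 10)) svg_lines) s
    = (PySem.List.pyRange 0 (min count (5 * (k : Int))) 1).foldl (fun sl i => sl ++ pvMark i) s := by
  induction k with
  | zero =>
    rw [show ((0:Nat):Int) = 0 from rfl,
        PySem.List.pyRange_one_eq_nil (le_refl 0),
        PySem.List.pyRange_one_eq_nil (by omega : min count (5*(0:Int)) ≤ 0)]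
    rfl
  | succ n ih =>
    have h5n : 5 * (n:Int) < count := by
      have := (PySem.Int.le_floordiv_iff_mul_le (a := count + 4) (b := 5) (q := ((n:Int)+1)) (by norm_num)).mp
        (by push_cast at hk ⊢; omega)
      omega
    have hn : (n : Int) ≤ PySem.Int.floordiv (count + 4) 5 := by push_cast at hk ⊢; omega
    rw [show ((n+1:Nat):Int) = (n:Int)+1 by push_cast; ring,
        PySem.List.pyRange_one_succ_right (by positivity : (0:Int) ≤ (n:Int))]
    rw [List.foldl_append, ih hn, List.foldl_cons, List.foldl_nil]
    rw [pv_group_eq count n h5n]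
    rw [show min count (5*((n:Int)+1)) = min count (5*(n:Int)+5) by ring_nf,
        PySem.List.pyRange_one_append 0 (5*(n:Int)) (min count (5*(n:Int)+5))
          (by positivity) (by omega),
        List.foldl_append]
    rw [show min count (5*(n:Int)) = 5*(n:Int) by omega]

theorem pv_A_groups' (count G : Int) (h0 : 0 ≤ G)
    (hk : G ≤ PySem.Int.floordiv (count + 4) 5) (s : String) :
    (PySem.List.pyRange 0 G 1).foldl (fun svg_lines g =>
      if min 5 (count - g * 5) == 5 then
        ((PySem.List.pyRange 0 (min (min 5 (count - g * 5)) 4) 1).foldl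
          (fun svg_lines i => svg_lines ++ pvVertA (g * (40 + 20) + i * 10)) svg_lines) ++
          pvDiagA (g * (40 + 20))
      else (PySem.List.pyRange 0 (min (min 5 (count - g * 5)) 4) 1).foldl
        (fun svg_lines i => svg_lines ++ pvVertA (g * (40 + 20) + i * 10)) svg_lines) s
    = (PySem.List.pyRange 0 (min count (5 * G)) 1).foldl (fun sl i => sl ++ pvMark i) s := by
  obtain ⟨k, rfl⟩ := Int.eq_ofNat_of_zero_le h0
  exact pv_A_groups count k hk s

theorem pv_B_body :
    (fun (parts : List String) (i : Int) =>
      let g := PySem.Int.floordiv i 5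
      let idx := PySem.Int.mod i 5
      if idx < 4 then
        let x := g * 60 + idx * 10
        parts ++ ["<line x1=\"" ++ PySem.Int.toStr x ++ "\" y1=\"5\" x2=\"" ++ PySem.Int.toStr x ++
          "\" y2=\"45\" stroke=\"white\" stroke-width=\"4\" stroke-linecap=\"round\" />"]
      else
        let gx := g * 60
        parts ++ ["<line x1=\"" ++ PySem.Int.toStr (gx - 5) ++ "\" y1=\"5\" x2=\"" ++ PySem.Int.toStr (gx + 35) ++
          "\" y2=\"45\" stroke=\"white\" stroke-width=\"4\" stroke-linecap=\"round\" />"])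
    = (fun p i => p ++ [pvMark i]) := by
  funext p i
  simp only [pvMark, pvVertA, pvDiagA]
  by_cases h : PySem.Int.mod i 5 < 4
  · simp only [if_pos h]
  · simp only [if_neg h]

-- ===== VERDICT (by name: the statement is the Claim_ definition above) =====
theorem create_tally_svg_spec : Claim_equal_create_tally_svg := by
  intro count _
  unfold Spec_create_tally_svg create_tally_svg create_tally_svg_alt
  simp only []
  rw [pv_B_body, pv_join_foldl,
      show PySem.Str.join "" ([] : List String) = "" from rfl,
      show PySem.Int.toStr 50 = "50" from by decide]
  rcases lt_or_ge count 1 with hc | hc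
  · have hG : PySem.Int.floordiv (count + 4) 5 ≤ 0 := by
      have := (PySem.Int.floordiv_lt_iff_lt_mul (a := count + 4) (b := 5) (q := 1)
        (by norm_num)).mpr (by omega)
      omega
    rw [PySem.List.pyRange_one_eq_nil hG, PySem.List.pyRange_one_eq_nil (by omega : count ≤ (0:Int)),
        show ((40:Int) + 20) = 60 from by norm_num]
    simp [String.append_assoc]
  · have hG0 : (0:Int) ≤ PySem.Int.floordiv (count + 4) 5 := by
      have := (PySem.Int.le_floordiv_iff_mul_le (a := count + 4) (b := 5) (q := 1)
        (by norm_num)).mpr (by omega)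
      omega
    have hle : count ≤ 5 * PySem.Int.floordiv (count + 4) 5 := by
      have := (PySem.Int.floordiv_eq_iff_of_pos (a := count + 4) (b := 5)
        (q := PySem.Int.floordiv (count + 4) 5) (by norm_num)).mp rfl
      omega
    rw [pv_A_groups' count _ hG0 (le_refl _),
        show min count (5 * PySem.Int.floordiv (count + 4) 5) = count from by omega,
        show ((40:Int) + 20) = 60 from by norm_num]
    simp [String.append_assoc]
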